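-- pv_equiv track=rewrite | github.com/IES-Rafael-Alberti/dawb1-2425-ejercicios-u2-falbmun0906 | src/bucles/ej22_08_v2.py | hacer_triangulo
-- ===== SOURCE A (Python) =====
-- def es_par(numero):
--     if numero % 2 == 0:
--         return True
--     else:
--         return False
--
-- def hacer_triangulo(numero):
--     fila = ""
--     par = es_par(numero)
--     triangulo = ""
--
--     for i in range(0, numero + 1):
--         if not par:
--             if i % 2 != 0:
--                 fila += str(i)[::-1] + " "
--                 triangulo += fila[::-1] + "\n"
--         elif par:
--             if i % 2 == 0:
--                 fila += str(i)[::-1] + " "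
--                 triangulo += fila[::-1] + "\n"
--
--     triangulo = triangulo[:-1]
--     return triangulo
-- ===== SOURCE B (Python) =====
-- def hacer_triangulo(numero):
--     nums = [i for i in range(numero + 1) if i % 2 == numero % 2]
--     rows = []
--     for k in range(1, len(nums) + 1):
--         rows.append(" " + " ".join(str(x) for x in reversed(nums[:k])))
--     return "\n".join(rows)
-- ===== Notes on version B (the rewrite author's own statement) =====
-- stated objective: simpler
-- what changed: B first collects the relevant numbers with one filtered range, then builds each row directly as a space-joined reversed prefix slice and joins the rows with newlines, instead of A's running comma-free string accumulator with per-digit and per-row whole-string reversals and a trailing-newline chop.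
import Mathlib
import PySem

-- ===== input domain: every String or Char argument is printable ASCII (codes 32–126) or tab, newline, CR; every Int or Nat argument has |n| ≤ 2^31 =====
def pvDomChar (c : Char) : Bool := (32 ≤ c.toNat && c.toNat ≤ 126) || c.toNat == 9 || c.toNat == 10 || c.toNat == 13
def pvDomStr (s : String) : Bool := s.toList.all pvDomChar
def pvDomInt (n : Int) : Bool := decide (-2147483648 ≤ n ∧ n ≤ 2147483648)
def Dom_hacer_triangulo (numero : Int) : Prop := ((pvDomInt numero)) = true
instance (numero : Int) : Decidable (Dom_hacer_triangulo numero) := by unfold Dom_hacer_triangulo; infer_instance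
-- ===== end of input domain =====

-- B builds each row directly as a space-join over a reversed prefix of the filtered number
-- list instead of A's running reversed-string accumulator; objective: simpler.

-- ===== PORT A =====
def es_par (numero : Int) : Bool :=
  if PySem.Int.mod numero 2 == 0 then true else false

-- state = (fila, triangulo) as character lists; str(i)[::-1] is (toChars i).reverse and
-- fila[::-1] is fila.reverse (exact: [::-1] reverses); triangulo[:-1] is the final slice.
def hacer_triangulo (numero : Int) : String :=
  let par := es_par numero
  let st := (PySem.List.pyRange 0 (numero + 1)).foldl
    (fun (st : List Char × List Char) i =>
      if !par then
        if PySem.Int.mod i 2 != 0 then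
          let fila := st.1 ++ (PySem.Int.toChars i).reverse ++ [' ']
          (fila, st.2 ++ fila.reverse ++ ['\n'])
        else st
      else
        if PySem.Int.mod i 2 == 0 then
          let fila := st.1 ++ (PySem.Int.toChars i).reverse ++ [' ']
          (fila, st.2 ++ fila.reverse ++ ['\n'])
        else st)
    ([], [])
  String.ofList (PySem.List.slice st.2 none (some (-1)))

-- ===== PORT B =====
def hacer_triangulo_alt (numero : Int) : String :=
  let nums := (PySem.List.pyRange 0 (numero + 1)).filter
    (fun i => PySem.Int.mod i 2 == PySem.Int.mod numero 2)
  let rows := (PySem.List.pyRange 1 ((nums.length : Int) + 1)).map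
    (fun k => [' '] ++ PySem.Chars.join [' ']
      ((PySem.List.slice nums none (some k)).reverse.map PySem.Int.toChars))
  String.ofList (PySem.Chars.join ['\n'] rows)

-- ===== PRECONDITION & SPEC =====
def Spec_hacer_triangulo (numero : Int) (out : String) : Prop := out = hacer_triangulo_alt numero
instance (numero : Int) (out : String) : Decidable (Spec_hacer_triangulo numero out) := by unfold Spec_hacer_triangulo; infer_instance

-- ===== CLAIM (what is proved, stated in full; the proofs are below) =====
def Claim_equal_hacer_triangulo : Prop := ∀ (numero : Int), Dom_hacer_triangulo numero → Spec_hacer_triangulo numero (hacer_triangulo numero)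

-- ===== LEMMAS AND PROOFS =====

-- the unconditional loop body of A
def pvStep (st : List Char × List Char) (i : Int) : List Char × List Char :=
  let fila := st.1 ++ (PySem.Int.toChars i).reverse ++ [' ']
  (fila, st.2 ++ fila.reverse ++ ['\n'])

def filaOf (l : List Int) : List Char :=
  (l.map (fun x => (PySem.Int.toChars x).reverse ++ [' '])).flatten

-- a row: leading-space-prefixed numbers of the prefix, newest first
def rowC (p : List Int) : List Char :=
  (p.reverse.map (fun x => ' ' :: PySem.Int.toChars x)).flatten

def rowsC (l : List Int) : List (List Char) :=
  (List.range l.length).map (fun k => rowC (l.take (k + 1)))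

def triA (l : List Int) : List Char :=
  ((rowsC l).map (· ++ ['\n'])).flatten

theorem filaOf_append_singleton (l : List Int) (x : Int) :
    filaOf (l ++ [x]) = filaOf l ++ (PySem.Int.toChars x).reverse ++ [' '] := by
  simp [filaOf]

theorem reverse_filaOf (p : List Int) : (filaOf p).reverse = rowC p := by
  simp [filaOf, rowC, List.reverse_flatten, Function.comp_def]

theorem rowsC_append_singleton (l : List Int) (x : Int) :
    rowsC (l ++ [x]) = rowsC l ++ [rowC (l ++ [x])] := by
  unfold rowsC
  rw [List.length_append, List.length_singleton, List.range_succ, List.map_append]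
  congr 1
  · apply List.map_congr_left
    intro k hk
    rw [List.mem_range] at hk
    rw [List.take_append_of_le_length (by omega)]
  · rw [List.map_singleton, List.take_of_length_le (by simp)]

theorem triA_append_singleton (l : List Int) (x : Int) :
    triA (l ++ [x]) = triA l ++ rowC (l ++ [x]) ++ ['\n'] := by
  simp [triA, rowsC_append_singleton]

theorem foldl_pvStep (l : List Int) :
    l.foldl pvStep ([], []) = (filaOf l, triA l) := by
  induction l using List.reverseRecOn with
  | nil => rfl
  | append_singleton l x ih =>
      rw [List.foldl_append, ih]
      simp only [List.foldl_cons, List.foldl_nil, pvStep]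
      rw [← filaOf_append_singleton, reverse_filaOf, ← triA_append_singleton]

-- " " + " ".join(numbers) is the flattening of the space-prefixed numbers (nonempty case)
theorem join_flatten (q : List Int) (hq : q ≠ []) :
    [' '] ++ PySem.Chars.join [' '] (q.map PySem.Int.toChars) =
      (q.map (fun x => ' ' :: PySem.Int.toChars x)).flatten := by
  induction q with
  | nil => exact absurd rfl hq
  | cons a r ih =>
      cases r with
      | nil => simp [PySem.Chars.join_singleton]
      | cons b r' =>
          have h := ih (by simp)
          calc [' '] ++ PySem.Chars.join [' '] ((a :: b :: r').map PySem.Int.toChars)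
              = (' ' :: PySem.Int.toChars a) ++
                  ([' '] ++ PySem.Chars.join [' '] ((b :: r').map PySem.Int.toChars)) := by
                rw [show ((a :: b :: r').map PySem.Int.toChars)
                      = PySem.Int.toChars a :: PySem.Int.toChars b :: r'.map PySem.Int.toChars from rfl,
                  PySem.Chars.join_cons_cons]
                simp
            _ = (' ' :: PySem.Int.toChars a) ++
                  ((b :: r').map (fun x => ' ' :: PySem.Int.toChars x)).flatten := by rw [h]
            _ = ((a :: b :: r').map (fun x => ' ' :: PySem.Int.toChars x)).flatten := by simp

-- chopping the trailing '\n' from newline-terminated rows is the '\n'-join of the rows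
theorem dropLast_flatten_join (rs : List (List Char)) :
    ((rs.map (· ++ ['\n'])).flatten).dropLast = PySem.Chars.join ['\n'] rs := by
  induction rs with
  | nil => rfl
  | cons a r ih =>
      cases r with
      | nil => simp [PySem.Chars.join_singleton]
      | cons b r' =>
          rw [PySem.Chars.join_cons_cons, ← ih]
          simp only [List.map_cons, List.flatten_cons]
          rw [List.append_assoc]
          rw [List.dropLast_append_of_ne_nil (by simp), List.dropLast_append_of_ne_nil (by simp)]
          simp

def pvCond (numero : Int) : Int → Bool :=
  fun i => PySem.Int.mod i 2 == PySem.Int.mod numero 2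

theorem bodyA_eq_cond (numero : Int) (st : List Char × List Char) (i : Int) :
    (if !es_par numero then
        if PySem.Int.mod i 2 != 0 then pvStep st i else st
      else
        if PySem.Int.mod i 2 == 0 then pvStep st i else st) =
      (if pvCond numero i then pvStep st i else st) := by
  rcases PySem.Int.mod_two_eq numero with hn | hn <;>
    rcases PySem.Int.mod_two_eq i with hi2 | hi2 <;>
      simp only [es_par, pvCond, hn, hi2] <;> norm_num

theorem foldl_A_eq_filter (numero : Int) :
    (PySem.List.pyRange 0 (numero + 1)).foldl
      (fun (st : List Char × List Char) i =>
        if !es_par numero then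
          if PySem.Int.mod i 2 != 0 then
            let fila := st.1 ++ (PySem.Int.toChars i).reverse ++ [' ']
            (fila, st.2 ++ fila.reverse ++ ['\n'])
          else st
        else
          if PySem.Int.mod i 2 == 0 then
            let fila := st.1 ++ (PySem.Int.toChars i).reverse ++ [' ']
            (fila, st.2 ++ fila.reverse ++ ['\n'])
          else st)
      ([], []) =
    ((PySem.List.pyRange 0 (numero + 1)).filter (pvCond numero)).foldl pvStep ([], []) := by
  rw [List.foldl_filter]
  apply PySem.List.foldl_congr_mem
  intro st i _
  exact bodyA_eq_cond numero st i

-- B's row list over pyRange 1 .. len+1 is rowsC of the filtered list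
theorem rowsB_eq_rowsC (nums : List Int) :
    (PySem.List.pyRange 1 ((nums.length : Int) + 1)).map
      (fun k => [' '] ++ PySem.Chars.join [' ']
        ((PySem.List.slice nums none (some k)).reverse.map PySem.Int.toChars)) =
    rowsC nums := by
  have hrange : ∀ m : Nat, PySem.List.pyRange 1 ((m : Int) + 1) =
      (List.range m).map (fun (j : Nat) => (j : Int) + 1) := by
    intro m
    induction m with
    | zero => rfl
    | succ m ih =>
        rw [show ((m + 1 : Nat) : Int) + 1 = ((m : Int) + 1) + 1 by push_cast; ring,
          PySem.List.pyRange_one_succ_right (by omega), ih, List.range_succ]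
        simp
  rw [hrange, rowsC]
  simp only [List.map_map]
  apply List.map_congr_left
  intro j hj
  rw [List.mem_range] at hj
  simp only [Function.comp_def]
  rw [PySem.List.slice_to nums (b := (j : Int) + 1) (by omega),
    show ((j : Int) + 1).toNat = j + 1 by omega]
  have hne : (nums.take (j + 1)).reverse ≠ [] := by
    simp only [ne_eq, List.reverse_eq_nil_iff, List.take_eq_nil_iff, not_or]
    exact ⟨by omega, by rintro rfl; simp at hj⟩
  rw [join_flatten _ hne]
  rfl

-- ===== VERDICT (by name: the statement is the Claim_ definition above) =====
theorem hacer_triangulo_spec : Claim_equal_hacer_triangulo := by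
  intro numero _
  unfold Spec_hacer_triangulo
  simp only [hacer_triangulo, hacer_triangulo_alt]
  rw [foldl_A_eq_filter numero]
  rw [show ((PySem.List.pyRange 0 (numero + 1)).filter
        (fun i => PySem.Int.mod i 2 == PySem.Int.mod numero 2)) =
      (PySem.List.pyRange 0 (numero + 1)).filter (pvCond numero) from rfl]
  rw [foldl_pvStep, rowsB_eq_rowsC]
  rw [PySem.List.slice_to_neg_one]
  rw [show (filaOf ((PySem.List.pyRange 0 (numero + 1)).filter (pvCond numero)),
        triA ((PySem.List.pyRange 0 (numero + 1)).filter (pvCond numero))).2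
      = triA ((PySem.List.pyRange 0 (numero + 1)).filter (pvCond numero)) from rfl]
  rw [triA, dropLast_flatten_join]
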